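-- pv_equiv track=rewrite | github.com/cezary-rosinski/PBL-converter | SPUB_preprocessing.py | assign_places_to_publishers
-- ===== SOURCE A (Python) =====
-- def assign_places_to_publishers(x):
--     temp = {}
--     places = []
--     for i,subf in enumerate(x):
--         if list(subf.keys())[0] == '$a':
--             places.append(list(subf.values())[0])
--         elif list(subf.keys())[0] == '$b':
--             temp.setdefault(subf['$b'], list()).extend(places)
--             if i != len(x)-1 and list(x[i+1].keys())[0] == '$a':
--                 places = []
--     return temp
-- ===== SOURCE B (Python) =====
-- def assign_places_to_publishers(x):
--     items = [next(iter(d.items())) for d in x]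
--     # stage 1: cut the sequence into independent segments after each '$b'
--     # that is immediately followed by '$a'
--     blocks = []
--     cur = []
--     for k, v in items:
--         if cur and cur[-1][0] == '$b' and k == '$a':
--             blocks.append(cur)
--             cur = []
--         cur.append((k, v))
--     blocks.append(cur)
--     # stage 2: pair every '$b' with the '$a' values preceding it in its segment
--     events = []
--     for blk in blocks:
--         acc = []
--         for k, v in blk:
--             if k == '$a':
--                 acc.append(v)
--             elif k == '$b':
--                 events.append((v, list(acc)))
--     # stage 3: merge the event list into the result dict
--     temp = {}
--     for b, ps in events:
--         temp.setdefault(b, []).extend(ps)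
--     return temp
-- ===== Notes on version B (the rewrite author's own statement) =====
-- stated objective: alternative
-- what changed: B replaces A's single buffered scan with an i+1 lookahead and in-loop dict mutation by a three-stage pipeline: cut the subfield sequence into independent segments after each '$b' immediately followed by '$a', turn each segment into an explicit (publisher, places) event list, then fold the event list into the dict.
import Mathlib
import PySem

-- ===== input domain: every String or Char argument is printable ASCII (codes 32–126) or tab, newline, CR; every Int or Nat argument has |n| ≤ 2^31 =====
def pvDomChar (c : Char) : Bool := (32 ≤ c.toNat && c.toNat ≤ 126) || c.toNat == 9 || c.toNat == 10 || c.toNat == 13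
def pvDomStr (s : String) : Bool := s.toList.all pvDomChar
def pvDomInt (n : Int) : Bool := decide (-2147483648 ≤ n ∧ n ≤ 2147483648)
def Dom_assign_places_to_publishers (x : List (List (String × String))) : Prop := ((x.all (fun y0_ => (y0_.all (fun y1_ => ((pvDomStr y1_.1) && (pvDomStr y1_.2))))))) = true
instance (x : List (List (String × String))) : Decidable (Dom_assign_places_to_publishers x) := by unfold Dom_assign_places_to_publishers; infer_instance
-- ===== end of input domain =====

-- B replaces A's single buffered scan with lookahead by a three-stage pipeline (cut into
-- segments, build an explicit event list, fold the events into the dict); objective: alternative.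

-- ===== PORT A =====
-- A's loop: enumerate with lookahead 'x[i+1]'; recursion on the suffix, the '$b' branch
-- inspecting the head of the remaining list (= the i+1 check, with 'i != len(x)-1' = rest ≠ []).
def pvALoop (temp : PySem.Dict String (List String)) (places : List String) :
    List (List (String × String)) → PySem.Dict String (List String)
  | [] => temp
  | subf :: rest =>
    let d := PySem.Dict.ofList subf
    match PySem.List.pyGet? d.keys 0 with
    | none => temp  -- IndexError: list(subf.keys())[0] on an empty dict; excluded by Pre_
    | some k =>
      if k = "$a" then
        match PySem.List.pyGet? d.values 0 with
        | none => temp  -- IndexError (unreachable: keys nonempty ⇒ values nonempty)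
        | some v => pvALoop temp (places ++ [v]) rest
      else if k = "$b" then
        match d.get? "$b" with
        | none => temp  -- KeyError (unreachable when first key is '$b')
        | some v =>
          let temp' := PySem.Dict.modify temp v [] (fun ps => ps ++ places)
          match rest with
          | [] => pvALoop temp' places rest
          | next :: _ =>
            match PySem.List.pyGet? (PySem.Dict.ofList next).keys 0 with
            | none => temp'  -- IndexError at the lookahead on an empty dict; excluded by Pre_
            | some k' => pvALoop temp' (if k' = "$a" then [] else places) rest
      else pvALoop temp places rest

def assign_places_to_publishers (x : List (List (String × String))) : List (String × List String) :=
  (pvALoop PySem.Dict.empty [] x).items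

-- ===== PORT B =====
-- 'items = [next(iter(d.items())) for d in x]'; none = StopIteration on an empty dict (excluded by Pre_)
def pvItemsOf? : List (List (String × String)) → Option (List (String × String))
  | [] => some []
  | s :: rest =>
    match (PySem.Dict.ofList s).items.head? with
    | none => none
    | some kv => (pvItemsOf? rest).map (kv :: ·)

-- stage 1: cut the sequence into segments after each '$b' immediately followed by '$a'
-- ('cur and cur[-1][0] == '$b''; cur[-1] on the nonempty cur is cur.getLast?)
def pvSplit (cur : List (String × String)) : List (String × String) → List (List (String × String))
  | [] => [cur]
  | (k, v) :: rest =>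
    if cur ≠ [] ∧ cur.getLast?.map (·.1) = some "$b" ∧ k = "$a" then
      cur :: pvSplit [(k, v)] rest
    else
      pvSplit (cur ++ [(k, v)]) rest

-- stage 2 inner loop: pair every '$b' of a segment with the '$a' values before it
def pvBlockEvents (acc : List String) : List (String × String) → List (String × List String)
  | [] => []
  | (k, v) :: rest =>
    if k = "$a" then pvBlockEvents (acc ++ [v]) rest
    else if k = "$b" then (v, acc) :: pvBlockEvents acc rest
    else pvBlockEvents acc rest

-- stage 3: 'temp.setdefault(b, []).extend(ps)' over the event list
def pvFold (temp : PySem.Dict String (List String)) (events : List (String × List String)) :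
    PySem.Dict String (List String) :=
  events.foldl (fun t e => PySem.Dict.modify t e.1 [] (· ++ e.2)) temp

def assign_places_to_publishers_alt (x : List (List (String × String))) : List (String × List String) :=
  match pvItemsOf? x with
  | none => []  -- StopIteration on an empty dict; excluded by Pre_
  | some items =>
    (pvFold PySem.Dict.empty ((pvSplit [] items).flatMap (pvBlockEvents []))).items

-- ===== PRECONDITION & SPEC =====
-- Pre_ excludes inputs containing an empty dict, on which Python A raises IndexError.
def Pre_assign_places_to_publishers (x : List (List (String × String))) : Prop :=
  ∀ s ∈ x, s ≠ []
instance (x : List (List (String × String))) : Decidable (Pre_assign_places_to_publishers x) := by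
  unfold Pre_assign_places_to_publishers; infer_instance

def pvWitness_assign_places_to_publishers : (List (List (String × String))) :=
  [[("$a", "Warszawa")], [("$a", "Krakow")], [("$b", "PWN")], [("$a", "Lodz")], [("$b", "Ossolineum")]]

def Spec_assign_places_to_publishers (x : List (List (String × String))) (out : List (String × List String)) : Prop := out = assign_places_to_publishers_alt x
instance (x : List (List (String × String))) (out : List (String × List String)) : Decidable (Spec_assign_places_to_publishers x out) := by unfold Spec_assign_places_to_publishers; infer_instance

-- ===== CLAIM (what is proved, stated in full; the proofs are below) =====
def Claim_equal_assign_places_to_publishers : Prop := ∀ (x : List (List (String × String))), Dom_assign_places_to_publishers x → Pre_assign_places_to_publishers x → Spec_assign_places_to_publishers x (assign_places_to_publishers x)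

-- ===== LEMMAS AND PROOFS =====

-- A's event stream: the same control flow as A's loop, but emitting (publisher, places)
-- pairs instead of mutating the dict; the intermediate object both directions are related to.
def pvEvents (places : List String) : List (String × String) → List (String × List String)
  | [] => []
  | (k, v) :: rest =>
    if k = "$a" then pvEvents (places ++ [v]) rest
    else if k = "$b" then
      (v, places) :: pvEvents (if rest.head?.map (·.1) = some "$a" then [] else places) rest
    else pvEvents places rest

def pvAVals (l : List (String × String)) : List String :=
  l.filterMap (fun kv => if kv.1 = "$a" then some kv.2 else none)

theorem pv_fk_eq (s : List (String × String)) :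
    PySem.List.pyGet? (PySem.Dict.ofList s).keys 0 =
      ((PySem.Dict.ofList s).items.head?).map (·.1) := by
  cases h : (PySem.Dict.ofList s).items <;>
    simp [PySem.Dict.keys, h, PySem.List.pyGet?, PySem.List.pyIdx?]

theorem pv_fv_eq (s : List (String × String)) :
    PySem.List.pyGet? (PySem.Dict.ofList s).values 0 =
      ((PySem.Dict.ofList s).items.head?).map (·.2) := by
  cases h : (PySem.Dict.ofList s).items <;>
    simp [PySem.Dict.values, h, PySem.List.pyGet?, PySem.List.pyIdx?]

theorem pv_get_head {d : PySem.Dict String String} {v : String} {tl : List (String × String)}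
    (h : d.items = ("$b", v) :: tl) : d.get? "$b" = some v := by
  simp [PySem.Dict.get?, h]

-- an insert never leaves the items list empty
theorem pv_insert_ne_nil {d : PySem.Dict String String} (k v : String) :
    (d.insert k v).items ≠ [] := by
  rw [PySem.Dict.items_insert]
  split_ifs with h
  · intro he
    have : d.contains k = true := h
    rw [PySem.Dict.contains_eq_isSome_get?] at this
    cases hg : d.get? k with
    | none => simp [hg] at this
    | some w =>
      have := PySem.Dict.mem_items_of_get?_eq_some d hg
      simp [List.map_eq_nil_iff] at he
      simp [he] at this
  · simp

-- a dict built from a nonempty association list has a head item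
theorem pv_ofList_head_some (s : List (String × String)) (hs : s ≠ []) :
    ∃ kv, (PySem.Dict.ofList s).items.head? = some kv := by
  cases s with
  | nil => exact absurd rfl hs
  | cons p t =>
    suffices h : ∀ (t : List (String × String)) (d : PySem.Dict String String),
        d.items ≠ [] → (PySem.Dict.update d t).items ≠ [] by
      have h1 : (PySem.Dict.empty.insert p.1 p.2).items ≠ [] := pv_insert_ne_nil p.1 p.2
      have h2 := h t (PySem.Dict.empty.insert p.1 p.2) h1
      have : PySem.Dict.ofList (p :: t) = PySem.Dict.update (PySem.Dict.empty.insert p.1 p.2) t := rfl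
      rw [this]
      cases hh : (PySem.Dict.update (PySem.Dict.empty.insert p.1 p.2) t).items with
      | nil => exact absurd hh h2
      | cons a b => exact ⟨a, by simp⟩
    intro t
    induction t with
    | nil => intro d hd; exact hd
    | cons q t ih =>
      intro d _
      have : PySem.Dict.update d (q :: t) = PySem.Dict.update (d.insert q.1 q.2) t := rfl
      rw [this]
      exact ih _ (pv_insert_ne_nil q.1 q.2)

-- under Pre_, the item comprehension succeeds
theorem pv_items_some (x : List (List (String × String))) (h : ∀ s ∈ x, s ≠ []) :
    ∃ items, pvItemsOf? x = some items := by
  induction x with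
  | nil => exact ⟨[], rfl⟩
  | cons s rest ih =>
    obtain ⟨kv, hkv⟩ := pv_ofList_head_some s (h s (by simp))
    obtain ⟨its, hits⟩ := ih (fun t ht => h t (by simp [ht]))
    exact ⟨kv :: its, by simp [pvItemsOf?, hkv, hits]⟩

-- L1: A's loop is the fold of A's event stream
theorem pv_aloop_eq_fold (x : List (List (String × String))) :
    ∀ (items : List (String × String)) (temp : PySem.Dict String (List String))
      (places : List String),
      pvItemsOf? x = some items →
      pvALoop temp places x = pvFold temp (pvEvents places items) := by
  induction x with
  | nil =>
    intro items temp places h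
    simp only [pvItemsOf?, Option.some.injEq] at h
    subst h; rfl
  | cons subf rest ih =>
    intro items temp places h
    simp only [pvItemsOf?] at h
    cases hd : (PySem.Dict.ofList subf).items with
    | nil => simp [hd] at h
    | cons kv tl =>
      obtain ⟨k, v⟩ := kv
      rw [hd] at h
      simp only [List.head?_cons] at h
      cases hr : pvItemsOf? rest with
      | none => simp [hr] at h
      | some its =>
        rw [hr] at h
        simp only [Option.map_some, Option.some.injEq] at h
        subst h
        by_cases hka : k = "$a"
        · subst hka
          simp only [pvALoop, pvEvents, pv_fk_eq, pv_fv_eq, hd, List.head?_cons,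
            Option.map_some, if_true]
          exact ih its temp (places ++ [v]) hr
        · by_cases hkb : k = "$b"
          · subst hkb
            simp only [pvALoop, pvEvents, pv_fk_eq, hd, List.head?_cons, Option.map_some,
              pv_get_head hd, if_neg (by decide : ¬ ("$b" : String) = "$a"), if_true]
            have hfold : ∀ ev, pvFold temp ((v, places) :: ev) =
                pvFold (PySem.Dict.modify temp v [] (fun ps => ps ++ places)) ev := fun _ => rfl
            rw [hfold]
            cases rest with
            | nil =>
              simp only [pvItemsOf?, Option.some.injEq] at hr
              subst hr
              rfl
            | cons next rest2 =>
              simp only [pvItemsOf?] at hr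
              cases hnx : (PySem.Dict.ofList next).items with
              | nil => simp [hnx] at hr
              | cons kv2 tl2 =>
                rw [hnx] at hr
                simp only [List.head?_cons] at hr
                cases hr2 : pvItemsOf? rest2 with
                | none => simp [hr2] at hr
                | some its2 =>
                  rw [hr2] at hr
                  simp only [Option.map_some, Option.some.injEq] at hr
                  subst hr
                  simp only [hnx, List.head?_cons, Option.map_some]
                  have := ih (kv2 :: its2)
                    (PySem.Dict.modify temp v [] (fun ps => ps ++ places))
                    (if kv2.1 = "$a" then [] else places)
                    (by simp [pvItemsOf?, hnx, hr2])
                  by_cases h2 : kv2.1 = "$a" <;> simp [h2] at this ⊢ <;> exact this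
          · simp only [pvALoop, pvEvents, pv_fk_eq, hd, List.head?_cons, Option.map_some,
              if_neg hka, if_neg hkb]
            exact ih its temp places hr

theorem pv_blockEvents_append (l1 : List (String × String)) :
    ∀ (l2 : List (String × String)) (acc : List String),
      pvBlockEvents acc (l1 ++ l2) =
        pvBlockEvents acc l1 ++ pvBlockEvents (acc ++ pvAVals l1) l2 := by
  induction l1 with
  | nil => intro l2 acc; simp [pvBlockEvents, pvAVals]
  | cons kv tl ih =>
    intro l2 acc
    obtain ⟨k, v⟩ := kv
    by_cases hka : k = "$a"
    · simp only [List.cons_append, pvBlockEvents, if_pos hka, ih]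
      simp [pvAVals, hka]
    · by_cases hkb : k = "$b"
      · simp only [List.cons_append, pvBlockEvents, if_neg hka, if_pos hkb, ih]
        simp [pvAVals, hka]
      · simp only [List.cons_append, pvBlockEvents, if_neg hka, if_neg hkb, ih]
        simp [pvAVals, hka]

-- L2: B's split/per-segment pipeline produces exactly A's event stream
theorem pv_split_eq_events (l : List (String × String)) :
    ∀ (cur : List (String × String)) (places : List String),
      (if cur.getLast?.map (·.1) = some "$b" ∧ l.head?.map (·.1) = some "$a"
        then places = [] else places = pvAVals cur) →
      (pvSplit cur l).flatMap (pvBlockEvents []) =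
        pvBlockEvents [] cur ++ pvEvents places l := by
  induction l with
  | nil =>
    intro cur places h
    rw [if_neg (by simp)] at h
    simp [pvSplit, pvEvents]
  | cons kv rest ih =>
    intro cur places h
    obtain ⟨k, v⟩ := kv
    simp only [List.head?_cons, Option.map_some] at h
    by_cases hka : k = "$a"
    · subst hka
      by_cases hb : cur ≠ [] ∧ cur.getLast?.map (·.1) = some "$b"
      · -- boundary: flush cur, start a new segment with this '$a'
        rw [if_pos ⟨hb.2, rfl⟩] at h
        subst h
        rw [show pvSplit cur (("$a", v) :: rest) = cur :: pvSplit [("$a", v)] rest from by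
          rw [pvSplit, if_pos ⟨hb.1, hb.2, rfl⟩]]
        rw [List.flatMap_cons]
        rw [ih [("$a", v)] [v] (by
          by_cases hh : rest.head?.map (·.1) = some "$a" <;>
            simp [hh, pvAVals, List.getLast?])]
        simp [pvEvents, pvBlockEvents]
      · -- no boundary
        have hpl : places = pvAVals cur := by
          rcases hg : cur.getLast?.map (·.1) with _ | w
          · rw [hg, if_neg (by simp)] at h; exact h
          · have hw : ¬ w = "$b" := by
              intro hwb; subst hwb
              exact hb ⟨by rintro rfl; simp [List.getLast?] at hg, hg⟩
            rw [hg, if_neg (by simp [hw])] at h; exact h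
        subst hpl
        rw [show pvSplit cur (("$a", v) :: rest) = pvSplit (cur ++ [("$a", v)]) rest from by
          rw [pvSplit, if_neg (by rintro ⟨h1, h2, _⟩; exact hb ⟨h1, h2⟩)]]
        rw [ih (cur ++ [("$a", v)]) (pvAVals cur ++ [v]) (by
          by_cases hh : rest.head?.map (·.1) = some "$a" <;>
            simp [hh, pvAVals])]
        rw [pv_blockEvents_append]
        simp [pvEvents, pvBlockEvents, pvAVals]
    · have hpl : places = pvAVals cur := by
        rw [if_neg (by rintro ⟨_, hk⟩; simp at hk; exact hka hk)] at h; exact h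
      subst hpl
      have hsp : pvSplit cur ((k, v) :: rest) = pvSplit (cur ++ [(k, v)]) rest := by
        rw [pvSplit, if_neg (by rintro ⟨_, _, hk⟩; exact hka hk)]
      by_cases hkb : k = "$b"
      · subst hkb
        rw [hsp]
        rw [ih (cur ++ [("$b", v)]) (if rest.head?.map (·.1) = some "$a" then [] else pvAVals cur) (by
          by_cases hh : rest.head?.map (·.1) = some "$a" <;>
            simp [hh, pvAVals])]
        rw [pv_blockEvents_append]
        simp [pvEvents, pvBlockEvents, pvAVals]
      · rw [hsp]
        rw [ih (cur ++ [(k, v)]) (pvAVals cur) (by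
          by_cases hh : rest.head?.map (·.1) = some "$a" <;>
            simp [hh, pvAVals, hka, hkb])]
        rw [pv_blockEvents_append]
        simp [pvEvents, pvBlockEvents, pvAVals, hka, hkb]

-- ===== VERDICT (by name: the statement is the Claim_ definition above) =====
theorem assign_places_to_publishers_spec : Claim_equal_assign_places_to_publishers := by
  intro x _ hpre
  unfold Spec_assign_places_to_publishers assign_places_to_publishers assign_places_to_publishers_alt
  obtain ⟨items, hitems⟩ := pv_items_some x hpre
  rw [hitems, pv_aloop_eq_fold x items PySem.Dict.empty [] hitems]
  show (pvFold PySem.Dict.empty (pvEvents [] items)).items =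
    (pvFold PySem.Dict.empty ((pvSplit [] items).flatMap (pvBlockEvents []))).items
  rw [pv_split_eq_events items [] [] (by simp [pvAVals])]
  simp [pvBlockEvents]
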